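-- pv_equiv track=rewrite | github.com/L3LeTrigger-F/code_perspective | feature/FileParse.py | calculateMemoryRecall
-- ===== SOURCE A (Python) =====
-- def calculateMemoryRecall(tokens):
--     newNumber=0
--     deleteNumber=0
--     new_list=['new','malloc']
--     delete_list=['delete','free']
--     for tk in tokens:
--         if tk in new_list:
--             newNumber+=1
--         elif tk in delete_list:
--             deleteNumber+=1
--     return {"deleteNumber":deleteNumber,"newNumber":newNumber}
-- ===== SOURCE B (Python) =====
-- def calculateMemoryRecall(tokens):
--     return {"deleteNumber": tokens.count('delete') + tokens.count('free'),
--             "newNumber": tokens.count('new') + tokens.count('malloc')}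
-- ===== Notes on version B (the rewrite author's own statement) =====
-- stated objective: simpler
-- what changed: Replaces the single scan with per-token if/elif branching and two running counters by four independent list.count passes, one per keyword, combined arithmetically.
import Mathlib
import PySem

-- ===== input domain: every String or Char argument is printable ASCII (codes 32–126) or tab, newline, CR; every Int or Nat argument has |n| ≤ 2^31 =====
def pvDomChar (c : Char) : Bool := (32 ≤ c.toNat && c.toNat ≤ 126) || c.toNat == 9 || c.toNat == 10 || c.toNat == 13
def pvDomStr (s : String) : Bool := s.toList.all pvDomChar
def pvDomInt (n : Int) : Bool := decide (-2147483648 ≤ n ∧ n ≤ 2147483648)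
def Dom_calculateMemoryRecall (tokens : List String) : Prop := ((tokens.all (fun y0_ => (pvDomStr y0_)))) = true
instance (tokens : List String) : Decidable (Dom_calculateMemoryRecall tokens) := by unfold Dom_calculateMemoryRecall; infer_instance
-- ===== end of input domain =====

-- B replaces the per-token if/elif scan with four independent count passes; simpler.
-- ===== PORT A =====
def calculateMemoryRecall (tokens : List String) : List (String × Int) :=
  let new_list := ["new", "malloc"]
  let delete_list := ["delete", "free"]
  let st := tokens.foldl (fun (p : Int × Int) tk =>
    if new_list.contains tk then (p.1 + 1, p.2)
    else if delete_list.contains tk then (p.1, p.2 + 1)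
    else p) (0, 0)
  [("deleteNumber", st.2), ("newNumber", st.1)]

-- ===== PORT B =====
-- B: four independent list.count passes (PySem.List.count = list.count), no per-token branching.
def calculateMemoryRecall_alt (tokens : List String) : List (String × Int) :=
  [("deleteNumber", (PySem.List.count tokens "delete" : Int) + PySem.List.count tokens "free"),
   ("newNumber", (PySem.List.count tokens "new" : Int) + PySem.List.count tokens "malloc")]

-- ===== PRECONDITION & SPEC =====
def Spec_calculateMemoryRecall (tokens : List String) (out : List (String × Int)) : Prop := out = calculateMemoryRecall_alt tokens
instance (tokens : List String) (out : List (String × Int)) : Decidable (Spec_calculateMemoryRecall tokens out) := by unfold Spec_calculateMemoryRecall; infer_instance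

-- ===== CLAIM (what is proved, stated in full; the proofs are below) =====
def Claim_equal_calculateMemoryRecall : Prop := ∀ (tokens : List String), Dom_calculateMemoryRecall tokens → Spec_calculateMemoryRecall tokens (calculateMemoryRecall tokens)

-- ===== LEMMAS AND PROOFS =====

-- ===== VERDICT (by name: the statement is the Claim_ definition above) =====
def pvStepA (p : Int × Int) (tk : String) : Int × Int :=
  if ["new", "malloc"].contains tk then (p.1 + 1, p.2)
  else if ["delete", "free"].contains tk then (p.1, p.2 + 1)
  else p

lemma foldA_counts (tokens : List String) (a b : Int) :
    tokens.foldl pvStepA (a, b)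
    = (a + tokens.count "new" + tokens.count "malloc",
       b + tokens.count "delete" + tokens.count "free") := by
  induction tokens generalizing a b with
  | nil => simp
  | cons t ts ih =>
    rw [List.foldl_cons]
    by_cases h1 : t = "new"
    · subst h1
      rw [show pvStepA (a, b) "new" = (a + 1, b) by simp [pvStepA], ih]
      simp [Prod.ext_iff]; omega
    · by_cases h2 : t = "malloc"
      · subst h2
        rw [show pvStepA (a, b) "malloc" = (a + 1, b) by simp [pvStepA], ih]
        simp [Prod.ext_iff]; omega
      · by_cases h3 : t = "delete"
        · subst h3
          rw [show pvStepA (a, b) "delete" = (a, b + 1) by simp [pvStepA], ih]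
          simp [Prod.ext_iff]; omega
        · by_cases h4 : t = "free"
          · subst h4
            rw [show pvStepA (a, b) "free" = (a, b + 1) by simp [pvStepA], ih]
            simp [Prod.ext_iff]; omega
          · rw [show pvStepA (a, b) t = (a, b) by simp [pvStepA, h1, h2, h3, h4], ih]
            simp [h1, h2, h3, h4]

theorem calculateMemoryRecall_spec : Claim_equal_calculateMemoryRecall := by
  intro tokens _
  unfold Spec_calculateMemoryRecall
  show [("deleteNumber", (tokens.foldl pvStepA ((0 : Int), (0 : Int))).2),
        ("newNumber", (tokens.foldl pvStepA ((0 : Int), (0 : Int))).1)]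
      = calculateMemoryRecall_alt tokens
  rw [foldA_counts]
  simp [calculateMemoryRecall_alt, PySem.List.count_eq]
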